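-- pv_equiv track=rewrite | github.com/hnyoojin/chim-boogie | week3/yoojin/prob2.py | max_value_stolen
-- ===== SOURCE A (Python) =====
-- def max_value_stolen(N, M, C, weights):
--     best_options = []
--
--     for r in range(N):
--         options = []
--         for c in range(N - M + 1):
--             items = weights[r][c:c+M]
--
--             values = [w*w for w in items]
--             max_value = knapsack(items, values, C)
--
--             options.append((max_value, c, c+M-1))
--
--         best_options.append(options)
--
--     max_total_value = 0
--
--     for r1 in range(N):
--         for i, (val1, start1, end1) in enumerate(best_options[r1]):
--             for j, (val2, start2, end2) in enumerate(best_options[r1]):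
--                 if i != j and (end1 < start2 or end2 < start1):
--                     max_total_value = max(max_total_value, val1 + val2)
--
--             for r2 in range(N):
--                 if r1 != r2:
--                     for val2, _, _ in best_options[r2]:
--                         max_total_value = max(max_total_value, val1 + val2)
--
--     return max_total_value
--
-- def knapsack(weights, values, capacity):
--     n = len(weights)
--     dp = [0] * (capacity + 1)
--
--     for i in range(n):
--         for w in range(capacity, weights[i]-1, -1):
--             dp[w] = max(dp[w], dp[w-weights[i]] + values[i])
--
--     return dp[capacity]
-- ===== SOURCE B (Python) =====
-- def max_value_stolen(N, M, C, weights):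
--     W = M if M > 1 else 1
--     rows = []
--     for r in range(N):
--         vals = []
--         for c in range(N - M + 1):
--             items = weights[r][c:c+M]
--             vals.append(knapsack(items, [w * w for w in items], C))
--         rows.append(vals)
--
--     best = 0
--     # cross-row pairs: one pass over the row maxima, tracking the best maximum so far
--     row_max = [max(vals) for vals in rows if vals]
--     run = None
--     for x in row_max:
--         if run is not None:
--             best = max(best, run + x)
--         run = x if run is None else max(run, x)
--     # same-row disjoint pairs: prefix-max over windows at least W apart
--     for vals in rows:
--         run = None
--         for a, b in zip(vals, vals[W:]):
--             run = a if run is None else max(run, a)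
--             best = max(best, run + b)
--     return best
--
--
-- def knapsack(weights, values, capacity):  # unchanged helper from the module
--     n = len(weights)
--     dp = [0] * (capacity + 1)
--     for i in range(n):
--         for w in range(capacity, weights[i]-1, -1):
--             dp[w] = max(dp[w], dp[w-weights[i]] + values[i])
--     return dp[capacity]
-- ===== Notes on version B (the rewrite author's own statement) =====
-- stated objective: alternative
-- what changed: A's O(N^2 K^2) all-pairs-of-windows combination loops are replaced by one prefix-max pass per row for same-row disjoint pairs and a single running-maximum pass over the per-row maxima for cross-row pairs (the knapsack helper is unchanged); the knapsack calls dominate the measured running time, so this is not measurably faster overall.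
import Mathlib
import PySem

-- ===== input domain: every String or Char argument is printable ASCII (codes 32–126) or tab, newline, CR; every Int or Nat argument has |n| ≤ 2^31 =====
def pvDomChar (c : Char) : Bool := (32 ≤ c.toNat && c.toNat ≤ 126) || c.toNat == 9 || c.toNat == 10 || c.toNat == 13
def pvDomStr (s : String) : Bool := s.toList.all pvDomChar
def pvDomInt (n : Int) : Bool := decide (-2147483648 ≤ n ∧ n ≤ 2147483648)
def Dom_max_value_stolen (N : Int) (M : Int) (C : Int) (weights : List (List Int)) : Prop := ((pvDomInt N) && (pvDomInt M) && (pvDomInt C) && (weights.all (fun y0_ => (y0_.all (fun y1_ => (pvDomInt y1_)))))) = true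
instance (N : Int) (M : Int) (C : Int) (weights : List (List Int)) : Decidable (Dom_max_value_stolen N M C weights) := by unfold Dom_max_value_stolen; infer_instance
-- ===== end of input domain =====

-- B replaces A's all-pairs-of-windows combination loops by one prefix-max pass per row and a
-- running top-of-row-maxima pass across rows (objective: alternative algorithm for the combination
-- step; the knapsack helper is unchanged and dominates the running time).

-- ===== PORT A =====
-- shared helper: literal port of the module's `knapsack` (used verbatim by both A and B)
def knapsackPy (weights : List Int) (values : List Int) (capacity : Int) : Int :=
  let n := weights.length
  let dp : List Int := PySem.List.pyRepeat [(0 : Int)] (capacity + 1)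
  let dp := (PySem.List.pyRange 0 (n : Int) 1).foldl (fun dp i =>
      (PySem.List.pyRange capacity (PySem.List.pyGetD weights i 0 - 1) (-1)).foldl (fun dp w =>
        PySem.List.pySetD dp w
          (max (PySem.List.pyGetD dp w 0)
               (PySem.List.pyGetD dp (w - PySem.List.pyGetD weights i 0) 0 + PySem.List.pyGetD values i 0))) dp) dp
  PySem.List.pyGetD dp capacity 0

def max_value_stolen (N : Int) (M : Int) (C : Int) (weights : List (List Int)) : Int :=
  let best_options : List (List (Int × Int × Int)) :=
    (PySem.List.pyRange 0 N 1).foldl (fun acc r =>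
      acc ++ [(PySem.List.pyRange 0 (N - M + 1) 1).foldl (fun opts c =>
        let items := PySem.List.slice (PySem.List.pyGetD weights r []) (some c) (some (c + M))
        let values := items.map (fun w => w * w)
        let max_value := knapsackPy items values C
        opts ++ [(max_value, c, c + M - 1)]) []]) []
  (PySem.List.pyRange 0 N 1).foldl (fun acc r1 =>
    (PySem.List.enumerate (PySem.List.pyGetD best_options r1 [])).foldl (fun acc it =>
      let i := it.1
      let t1 := it.2
      let acc :=
        (PySem.List.enumerate (PySem.List.pyGetD best_options r1 [])).foldl (fun acc jt =>
          let j := jt.1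
          let t2 := jt.2
          if i ≠ j ∧ (t1.2.2 < t2.2.1 ∨ t2.2.2 < t1.2.1) then max acc (t1.1 + t2.1) else acc) acc
      (PySem.List.pyRange 0 N 1).foldl (fun acc r2 =>
        if r1 ≠ r2 then
          (PySem.List.pyGetD best_options r2 []).foldl (fun acc t2 => max acc (t1.1 + t2.1)) acc
        else acc) acc) acc) 0

-- ===== PORT B =====
def max_value_stolen_alt (N : Int) (M : Int) (C : Int) (weights : List (List Int)) : Int :=
  let W : Int := if M > 1 then M else 1
  let rows : List (List Int) :=
    (PySem.List.pyRange 0 N 1).foldl (fun rows r =>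
      rows ++ [(PySem.List.pyRange 0 (N - M + 1) 1).foldl (fun vals c =>
        let items := PySem.List.slice (PySem.List.pyGetD weights r []) (some c) (some (c + M))
        vals ++ [knapsackPy items (items.map (fun w => w * w)) C]) []]) []
  let best : Int := 0
  let row_max : List Int :=
    (rows.filter (fun vals => !vals.isEmpty)).map (fun vals => (PySem.List.max? vals (fun y => y)).getD 0)
  let cross : Int × Option Int :=
    row_max.foldl (fun p x =>
      ((match p.2 with | some run => max p.1 (run + x) | none => p.1),
       some (match p.2 with | some run => max run x | none => x))) (best, none)
  rows.foldl (fun best vals =>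
    ((vals.zip (PySem.List.slice vals (some W) none)).foldl (fun (p : Int × Option Int) ab =>
        let run := match p.2 with | some run => max run ab.1 | none => ab.1
        (max p.1 (run + ab.2), some run)) (best, (none : Option Int))).1) cross.1

-- ===== PRECONDITION & SPEC =====
-- Pre_ is exactly where Python A returns: it excludes IndexError inputs only (C < 0 with a window
-- evaluated, N > len(weights), or a negative weight inside some evaluated window, which overruns dp).
def Pre_max_value_stolen (N : Int) (M : Int) (C : Int) (weights : List (List Int)) : Prop :=
  N ≤ 0 ∨ N - M + 1 ≤ 0 ∨
    (0 ≤ C ∧ N ≤ (weights.length : Int) ∧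
      ((1 ≤ M ∧ ∀ row ∈ weights.take N.toNat, ∀ x ∈ row.take N.toNat, 0 ≤ x) ∨
       M = 0 ∨
       (M ≤ -1 ∧ ∀ row ∈ weights.take N.toNat,
          1 ≤ (row.length : Int) + M → ∀ x ∈ row.dropLast, 0 ≤ x)))
instance (N : Int) (M : Int) (C : Int) (weights : List (List Int)) : Decidable (Pre_max_value_stolen N M C weights) := by unfold Pre_max_value_stolen; infer_instance
def pvWitness_max_value_stolen : Int × Int × Int × List (List Int) := (2, 2, 3, [[1, 2], [2, 1]])

def Spec_max_value_stolen (N : Int) (M : Int) (C : Int) (weights : List (List Int)) (out : Int) : Prop := out = max_value_stolen_alt N M C weights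
instance (N : Int) (M : Int) (C : Int) (weights : List (List Int)) (out : Int) : Decidable (Spec_max_value_stolen N M C weights out) := by unfold Spec_max_value_stolen; infer_instance

-- ===== CLAIM (what is proved, stated in full; the proofs are below) =====
def Claim_equal_max_value_stolen : Prop := ∀ (N : Int) (M : Int) (C : Int) (weights : List (List Int)), Dom_max_value_stolen N M C weights → Pre_max_value_stolen N M C weights → Spec_max_value_stolen N M C weights (max_value_stolen N M C weights)


-- ===== LEMMAS AND PROOFS =====

-- proof-side views of the two programs
def pvVal (M C : Int) (row : List Int) (c : Int) : Int :=
  let items := PySem.List.slice row (some c) (some (c + M))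
  knapsackPy items (items.map (fun w => w * w)) C

def pvF (M C : Int) (weights : List (List Int)) (r c : Int) : Int :=
  pvVal M C (PySem.List.pyGetD weights r []) c

def pvOptRow (N M C : Int) (weights : List (List Int)) (r : Int) : List (Int × Int × Int) :=
  (PySem.List.pyRange 0 (N - M + 1) 1).map (fun c => (pvF M C weights r c, c, c + M - 1))

def pvValRow (N M C : Int) (weights : List (List Int)) (r : Int) : List Int :=
  (PySem.List.pyRange 0 (N - M + 1) 1).map (pvF M C weights r)

def pvCrossStep (p : Int × Option Int) (x : Int) : Int × Option Int :=
  ((match p.2 with | some run => max p.1 (run + x) | none => p.1),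
   some (match p.2 with | some run => max run x | none => x))

def pvPairStep (p : Int × Option Int) (ab : Int × Int) : Int × Option Int :=
  let run := match p.2 with | some run => max run ab.1 | none => ab.1
  (max p.1 (run + ab.2), some run)

def pvACrossIn (v1 : Int) (acc : Int) (t2 : Int × Int × Int) : Int := max acc (v1 + t2.1)

def pvACross (N : Int) (bo : List (List (Int × Int × Int))) (r1 : Int) (v1 : Int) (acc : Int) (r2 : Int) : Int :=
  if r1 ≠ r2 then (PySem.List.pyGetD bo r2 []).foldl (pvACrossIn v1) acc else acc

def pvASame (it : Int × Int × Int × Int) (acc : Int) (jt : Int × Int × Int × Int) : Int :=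
  if it.1 ≠ jt.1 ∧ (it.2.2.2 < jt.2.2.1 ∨ jt.2.2.2 < it.2.2.1) then max acc (it.2.1 + jt.2.1) else acc

def pvAOut (N : Int) (bo : List (List (Int × Int × Int))) (acc : Int) (r1 : Int) : Int :=
  (PySem.List.enumerate (PySem.List.pyGetD bo r1 [])).foldl (fun acc it =>
    (PySem.List.pyRange 0 N 1).foldl (pvACross N bo r1 it.2.1)
      ((PySem.List.enumerate (PySem.List.pyGetD bo r1 [])).foldl (pvASame it) acc)) acc

def pvA2 (N : Int) (bo : List (List (Int × Int × Int))) : Int :=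
  (PySem.List.pyRange 0 N 1).foldl (pvAOut N bo) 0

def pvBPair (W : Int) (best : Int) (vals : List Int) : Int :=
  ((vals.zip (PySem.List.slice vals (some W) none)).foldl pvPairStep (best, (none : Option Int))).1

def pvRowMax (rows : List (List Int)) : List Int :=
  (rows.filter (fun vals => !vals.isEmpty)).map (fun vals => (PySem.List.max? vals (fun y => y)).getD 0)

def pvB2 (W : Int) (rows : List (List Int)) : Int :=
  rows.foldl (pvBPair W) ((pvRowMax rows).foldl pvCrossStep ((0 : Int), (none : Option Int))).1

lemma pvA_eq (N M C : Int) (weights : List (List Int)) :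
    max_value_stolen N M C weights = pvA2 N ((PySem.List.pyRange 0 N 1).map (pvOptRow N M C weights)) := by
  unfold max_value_stolen pvA2 pvAOut pvACross pvACrossIn pvASame pvOptRow pvF pvVal
  simp only [PySem.List.foldl_append_singleton_eq_map, List.nil_append]

lemma pvB_eq (N M C : Int) (weights : List (List Int)) :
    max_value_stolen_alt N M C weights
      = pvB2 (if M > 1 then M else 1) ((PySem.List.pyRange 0 N 1).map (pvValRow N M C weights)) := by
  unfold max_value_stolen_alt pvB2 pvBPair pvRowMax pvValRow pvF pvVal pvCrossStep pvPairStep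
  simp only [PySem.List.foldl_append_singleton_eq_map, List.nil_append]

-- generic max-accumulating fold facts
lemma pvFoldl_mono {a : Type} (step : Int → a → Int) (h : ∀ (x : Int) (y : a), x ≤ step x y) :
    ∀ (l : List a) (x : Int), x ≤ List.foldl step x l := by
  intro l
  induction l with
  | nil => intro x; simp
  | cons hd tl ih => intro x; exact le_trans (h x hd) (ih (step x hd))

lemma pvFoldl_le {a : Type} (step : Int → a → Int) (b : Int) :
    ∀ (l : List a), (∀ (x : Int) (y : a), y ∈ l → x ≤ b → step x y ≤ b) →
      ∀ (x : Int), x ≤ b → List.foldl step x l ≤ b := by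
  intro l
  induction l with
  | nil => intro _ x hx; simpa using hx
  | cons hd tl ih =>
      intro h x hx
      exact ih (fun x y hy => h x y (List.mem_cons_of_mem _ hy)) _ (h x hd (List.mem_cons_self) hx)

lemma pvFoldl_ge_via {a : Type} (step : Int → a → Int)
    (hmono : ∀ (x : Int) (y : a), x ≤ step x y) {l : List a} {y : a} (hy : y ∈ l)
    (c : Int) (hc : ∀ x : Int, c ≤ step x y) : ∀ x : Int, c ≤ List.foldl step x l := by
  induction l with
  | nil => cases hy
  | cons hd tl ih =>
      intro x
      rcases List.mem_cons.mp hy with h | h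
      · subst h; exact le_trans (hc x) (pvFoldl_mono step hmono tl _)
      · exact ih h _

-- sublist utilities
lemma pvSublist_pair_of_getElem {a : Type} :
    ∀ (l : List a) (i j : Nat) (hij : i < j) (hj : j < l.length),
      [l[i]'(by omega), l[j]'hj].Sublist l := by
  intro l
  induction l with
  | nil => intro i j _ hj; simp at hj
  | cons hd tl ih =>
      intro i j hij hj
      cases i with
      | zero =>
          cases j with
          | zero => omega
          | succ j' =>
              simpa using List.Sublist.cons₂ hd (List.singleton_sublist.mpr (List.getElem_mem _))
      | succ i' =>
          cases j with
          | zero => omega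
          | succ j' => exact List.Sublist.cons hd (ih i' j' (by omega) (by simpa using hj))

lemma pvSublist_pair_to_getElem {a : Type} :
    ∀ (l : List a) (x y : a), [x, y].Sublist l →
      ∃ (i j : Nat) (hi : i < l.length) (hj : j < l.length), i < j ∧ l[i]'hi = x ∧ l[j]'hj = y := by
  intro l
  induction l with
  | nil => intro x y h; cases h
  | cons hd tl ih =>
      intro x y h
      cases h with
      | cons _ h' =>
          obtain ⟨i, j, hi, hj, hij, hx, hy⟩ := ih x y h'
          exact ⟨i + 1, j + 1, by simpa using hi, by simpa using hj, by omega, by simpa using hx, by simpa using hy⟩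
      | cons₂ _ h' =>
          obtain ⟨j, hj, hy⟩ := List.mem_iff_getElem.mp (List.singleton_sublist.mp h')
          exact ⟨0, j + 1, by simp, by simpa using hj, by omega, rfl, by simpa using hy⟩

lemma pvSublist_pair_of_mem_sorted {a : Type} [Preorder a] :
    ∀ (l : List a), l.Pairwise (· < ·) → ∀ (x y : a), x ∈ l → y ∈ l → x < y → [x, y].Sublist l := by
  intro l
  induction l with
  | nil => intro _ x y hx; cases hx
  | cons hd tl ih =>
      intro hp x y hx hy hxy
      rcases List.mem_cons.mp hx with rfl | hx'
      · have hy' : y ∈ tl := by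
          rcases List.mem_cons.mp hy with rfl | h
          · exact absurd hxy (lt_irrefl _)
          · exact h
        exact List.Sublist.cons₂ x (List.singleton_sublist.mpr hy')
      · have hy' : y ∈ tl := by
          rcases List.mem_cons.mp hy with rfl | h
          · exact absurd (lt_trans ((List.pairwise_cons.mp hp).1 x hx') hxy) (lt_irrefl _)
          · exact h
        exact List.Sublist.cons hd (ih (List.pairwise_cons.mp hp).2 x y hx' hy' hxy)

-- crossStep fold facts
lemma pvCross_fst_mono : ∀ (l : List Int) (p : Int × Option Int), p.1 ≤ (List.foldl pvCrossStep p l).1 := by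
  intro l
  induction l with
  | nil => intro p; simp
  | cons hd tl ih =>
      intro p
      refine le_trans ?_ (ih (pvCrossStep p hd))
      unfold pvCrossStep
      rcases p with ⟨b, o⟩
      cases o <;> simp

lemma pvCross_ub : ∀ (l : List Int) (p : Int × Option Int) (b : Int), p.1 ≤ b →
    (∀ v, p.2 = some v → ∀ x ∈ l, v + x ≤ b) →
    (∀ x y : Int, [x, y].Sublist l → x + y ≤ b) →
    (List.foldl pvCrossStep p l).1 ≤ b := by
  intro l
  induction l with
  | nil => intro p b hb _ _; simpa using hb
  | cons hd tl ih =>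
      intro p b hb h2 h3
      refine ih (pvCrossStep p hd) b ?_ ?_ ?_
      · rcases p with ⟨bb, o⟩
        cases o with
        | none => simpa [pvCrossStep] using hb
        | some v =>
            simp only [pvCrossStep]
            exact max_le hb (h2 v rfl hd (List.mem_cons_self))
      · rcases p with ⟨bb, o⟩
        intro v hv x hx
        cases o with
        | none =>
            simp only [pvCrossStep] at hv
            cases hv
            exact h3 _ x (List.Sublist.cons₂ hd (List.singleton_sublist.mpr hx))
        | some w =>
            simp only [pvCrossStep] at hv
            cases hv
            have ha := h2 w rfl x (List.mem_cons_of_mem _ hx)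
            have hb2 := h3 hd x (List.Sublist.cons₂ hd (List.singleton_sublist.mpr hx))
            omega
      · intro x y hxy
        exact h3 x y (hxy.trans (List.sublist_cons_self hd tl))

lemma pvCross_lb_mem : ∀ (l : List Int) (p : Int × Option Int) (v y : Int), p.2 = some v → y ∈ l →
    v + y ≤ (List.foldl pvCrossStep p l).1 := by
  intro l
  induction l with
  | nil => intro _ _ _ _ hy; cases hy
  | cons hd tl ih =>
      intro p v y hv hy
      rcases List.mem_cons.mp hy with rfl | hy'
      · refine le_trans ?_ (pvCross_fst_mono tl (pvCrossStep p y))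
        rcases p with ⟨b, o⟩
        simp only at hv; subst hv
        simp [pvCrossStep]
      · rcases p with ⟨b, o⟩
        simp only at hv; subst hv
        refine le_trans ?_ (ih (pvCrossStep (b, some v) hd) (max v hd) y (by simp [pvCrossStep]) hy')
        omega

lemma pvCross_lb_pair : ∀ (l : List Int) (p : Int × Option Int) (x y : Int), [x, y].Sublist l →
    x + y ≤ (List.foldl pvCrossStep p l).1 := by
  intro l
  induction l with
  | nil => intro _ _ _ h; cases h
  | cons hd tl ih =>
      intro p x y h
      cases h with
      | cons _ h' => exact ih (pvCrossStep p hd) x y h'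
      | cons₂ _ h' =>
          have hy : y ∈ tl := List.singleton_sublist.mp h'
          have hrun : (pvCrossStep p hd).2 = some (match p.2 with | some run => max run hd | none => hd) := by
            rcases p with ⟨b, o⟩; cases o <;> simp [pvCrossStep]
          refine le_trans ?_ (pvCross_lb_mem tl (pvCrossStep p hd) _ y hrun hy)
          have hx : hd ≤ (match p.2 with | some run => max run hd | none => hd) := by
            rcases p with ⟨b, o⟩; cases o <;> simp
          omega

-- pairStep fold facts
lemma pvPair_fst_mono : ∀ (l : List (Int × Int)) (p : Int × Option Int), p.1 ≤ (List.foldl pvPairStep p l).1 := by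
  intro l
  induction l with
  | nil => intro p; simp
  | cons hd tl ih =>
      intro p
      refine le_trans ?_ (ih (pvPairStep p hd))
      rcases p with ⟨b, o⟩
      cases o <;> simp [pvPairStep]

lemma pvPair_ub : ∀ (l : List (Int × Int)) (p : Int × Option Int) (b : Int), p.1 ≤ b →
    (∀ v, p.2 = some v → ∀ q ∈ l, v + q.2 ≤ b) →
    (∀ q ∈ l, q.1 + q.2 ≤ b) →
    (∀ q q' : Int × Int, [q, q'].Sublist l → q.1 + q'.2 ≤ b) →
    (List.foldl pvPairStep p l).1 ≤ b := by
  intro l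
  induction l with
  | nil => intro p b hb _ _ _; simpa using hb
  | cons hd tl ih =>
      intro p b hb h2 h3 h4
      refine ih (pvPairStep p hd) b ?_ ?_ ?_ ?_
      · rcases p with ⟨bb, o⟩
        cases o with
        | none =>
            simp only [pvPairStep]
            exact max_le hb (h3 hd (List.mem_cons_self))
        | some v =>
            have ha := h2 v rfl hd (List.mem_cons_self)
            have hb2 := h3 hd (List.mem_cons_self)
            show max bb (max v hd.1 + hd.2) ≤ b
            rcases max_cases v hd.1 with ⟨h1, _⟩ | ⟨h1, _⟩ <;> rw [h1] <;> exact max_le hb (by omega)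
      · intro v hv q hq
        rcases p with ⟨bb, o⟩
        cases o with
        | none =>
            simp only [pvPairStep] at hv
            cases hv
            exact h4 hd q (List.Sublist.cons₂ hd (List.singleton_sublist.mpr hq))
        | some w =>
            simp only [pvPairStep] at hv
            cases hv
            have ha := h2 w rfl q (List.mem_cons_of_mem _ hq)
            have hb2 := h4 hd q (List.Sublist.cons₂ hd (List.singleton_sublist.mpr hq))
            rcases max_cases w hd.1 with ⟨h1, _⟩ | ⟨h1, _⟩ <;> rw [h1] <;> omega
      · intro q hq; exact h3 q (List.mem_cons_of_mem _ hq)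
      · intro q q' hqq; exact h4 q q' (hqq.trans (List.sublist_cons_self hd tl))

lemma pvPair_lb_mem : ∀ (l : List (Int × Int)) (p : Int × Option Int) (v : Int) (q : Int × Int),
    p.2 = some v → q ∈ l → v + q.2 ≤ (List.foldl pvPairStep p l).1 := by
  intro l
  induction l with
  | nil => intro _ _ _ _ hq; cases hq
  | cons hd tl ih =>
      intro p v q hv hq
      rcases p with ⟨b, o⟩
      simp only at hv; subst hv
      rcases List.mem_cons.mp hq with rfl | hq'
      · refine le_trans ?_ (pvPair_fst_mono tl (pvPairStep (b, some v) q))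
        show v + q.2 ≤ max b (max v q.1 + q.2)
        have h1 := le_max_left v q.1
        have h2 := le_max_right b (max v q.1 + q.2)
        omega
      · refine le_trans ?_ (ih (pvPairStep (b, some v) hd) (max v hd.1) q (by simp [pvPairStep]) hq')
        have h1 := le_max_left v hd.1
        omega

lemma pvPair_lb_same : ∀ (l : List (Int × Int)) (p : Int × Option Int) (q : Int × Int),
    q ∈ l → q.1 + q.2 ≤ (List.foldl pvPairStep p l).1 := by
  intro l
  induction l with
  | nil => intro _ _ hq; cases hq
  | cons hd tl ih =>
      intro p q hq
      rcases List.mem_cons.mp hq with rfl | hq'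
      · refine le_trans ?_ (pvPair_fst_mono tl (pvPairStep p q))
        rcases p with ⟨b, o⟩
        cases o with
        | none => simp [pvPairStep]
        | some v =>
            show q.1 + q.2 ≤ max b (max v q.1 + q.2)
            have h1 := le_max_right v q.1
            have h2 := le_max_right b (max v q.1 + q.2)
            omega
      · exact ih (pvPairStep p hd) q hq'

lemma pvPair_lb_pair : ∀ (l : List (Int × Int)) (p : Int × Option Int) (q q' : Int × Int),
    [q, q'].Sublist l → q.1 + q'.2 ≤ (List.foldl pvPairStep p l).1 := by
  intro l
  induction l with
  | nil => intro _ _ _ h; cases h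
  | cons hd tl ih =>
      intro p q q' h
      cases h with
      | cons _ h' => exact ih (pvPairStep p hd) q q' h'
      | cons₂ _ h' =>
          have hq' : q' ∈ tl := List.singleton_sublist.mp h'
          have hrun : (pvPairStep p hd).2 = some (match p.2 with | some run => max run hd.1 | none => hd.1) := by
            rcases p with ⟨b, o⟩; cases o <;> simp [pvPairStep]
          refine le_trans ?_ (pvPair_lb_mem tl (pvPairStep p hd) _ q' hrun hq')
          have hq1 : hd.1 ≤ (match p.2 with | some run => max run hd.1 | none => hd.1) := by
            rcases p with ⟨b, o⟩; cases o <;> simp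
          omega

-- monotonicity of the accumulators
lemma pvACross_mono (N : Int) (bo : List (List (Int × Int × Int))) (r1 v1 : Int) :
    ∀ (acc r2 : Int), acc ≤ pvACross N bo r1 v1 acc r2 := by
  intro acc r2
  unfold pvACross
  split
  · exact pvFoldl_mono _ (fun a t => le_max_left a _) _ acc
  · exact le_refl acc

lemma pvASame_mono (it : Int × Int × Int × Int) :
    ∀ (acc : Int) (jt : Int × Int × Int × Int), acc ≤ pvASame it acc jt := by
  intro acc jt
  unfold pvASame
  split
  · exact le_max_left _ _
  · exact le_refl acc

lemma pvAOutStep_mono (N : Int) (bo : List (List (Int × Int × Int))) (r1 : Int) :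
    ∀ (a : Int) (it : Int × Int × Int × Int),
      a ≤ (PySem.List.pyRange 0 N 1).foldl (pvACross N bo r1 it.2.1)
            ((PySem.List.enumerate (PySem.List.pyGetD bo r1 [])).foldl (pvASame it) a) := by
  intro a it
  exact le_trans (pvFoldl_mono (pvASame it) (pvASame_mono it) _ a)
    (pvFoldl_mono (pvACross N bo r1 it.2.1) (pvACross_mono N bo r1 it.2.1) _ _)

lemma pvAOut_mono (N : Int) (bo : List (List (Int × Int × Int))) :
    ∀ (acc r1 : Int), acc ≤ pvAOut N bo acc r1 := by
  intro acc r1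
  unfold pvAOut
  exact pvFoldl_mono _ (pvAOutStep_mono N bo r1) _ acc

lemma pvA2_nonneg (N : Int) (bo : List (List (Int × Int × Int))) : 0 ≤ pvA2 N bo :=
  pvFoldl_mono _ (pvAOut_mono N bo) _ 0

lemma pvBPair_mono (W : Int) : ∀ (best : Int) (vals : List Int), best ≤ pvBPair W best vals := by
  intro best vals
  exact pvPair_fst_mono _ _

lemma pvB2_ge_cross (W : Int) (rows : List (List Int)) :
    ((pvRowMax rows).foldl pvCrossStep ((0 : Int), (none : Option Int))).1 ≤ pvB2 W rows :=
  pvFoldl_mono _ (pvBPair_mono W) _ _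

lemma pvB2_nonneg (W : Int) (rows : List (List Int)) : 0 ≤ pvB2 W rows :=
  le_trans (pvCross_fst_mono _ _) (pvB2_ge_cross W rows)

-- A-side lower bounds
lemma pvA_lb_same (N : Int) (bo : List (List (Int × Int × Int))) (r1 : Int)
    (hr1 : r1 ∈ PySem.List.pyRange 0 N 1) (it jt : Int × Int × Int × Int)
    (hit : it ∈ PySem.List.enumerate (PySem.List.pyGetD bo r1 []))
    (hjt : jt ∈ PySem.List.enumerate (PySem.List.pyGetD bo r1 []))
    (hg : it.1 ≠ jt.1 ∧ (it.2.2.2 < jt.2.2.1 ∨ jt.2.2.2 < it.2.2.1)) :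
    it.2.1 + jt.2.1 ≤ pvA2 N bo := by
  refine pvFoldl_ge_via (pvAOut N bo) (pvAOut_mono N bo) hr1 _ (fun acc => ?_) 0
  unfold pvAOut
  refine pvFoldl_ge_via _ (pvAOutStep_mono N bo r1) hit _ (fun a => ?_) acc
  refine le_trans ?_ (pvFoldl_mono _ (pvACross_mono N bo r1 it.2.1) _ _)
  refine pvFoldl_ge_via (pvASame it) (pvASame_mono it) hjt _ (fun a' => ?_) a
  unfold pvASame
  rw [if_pos hg]
  exact le_max_right _ _

lemma pvA_lb_cross (N : Int) (bo : List (List (Int × Int × Int))) (r1 r2 : Int)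
    (hr1 : r1 ∈ PySem.List.pyRange 0 N 1) (hr2 : r2 ∈ PySem.List.pyRange 0 N 1) (hne : r1 ≠ r2)
    (it : Int × Int × Int × Int) (hit : it ∈ PySem.List.enumerate (PySem.List.pyGetD bo r1 []))
    (t2 : Int × Int × Int) (ht2 : t2 ∈ PySem.List.pyGetD bo r2 []) :
    it.2.1 + t2.1 ≤ pvA2 N bo := by
  refine pvFoldl_ge_via (pvAOut N bo) (pvAOut_mono N bo) hr1 _ (fun acc => ?_) 0
  unfold pvAOut
  refine pvFoldl_ge_via _ (pvAOutStep_mono N bo r1) hit _ (fun a => ?_) acc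
  refine pvFoldl_ge_via (pvACross N bo r1 it.2.1) (pvACross_mono N bo r1 it.2.1) hr2 _ (fun a' => ?_) _
  unfold pvACross
  rw [if_pos hne]
  refine pvFoldl_ge_via (pvACrossIn it.2.1) (fun a t => le_max_left a _) ht2 _ (fun a'' => le_max_right _ _) a'

-- A-side upper bound
lemma pvA_ub (N : Int) (bo : List (List (Int × Int × Int))) (b : Int) (h0 : 0 ≤ b)
    (hsame : ∀ r1 ∈ PySem.List.pyRange 0 N 1, ∀ it jt : Int × Int × Int × Int,
      it ∈ PySem.List.enumerate (PySem.List.pyGetD bo r1 []) →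
      jt ∈ PySem.List.enumerate (PySem.List.pyGetD bo r1 []) →
      it.1 ≠ jt.1 ∧ (it.2.2.2 < jt.2.2.1 ∨ jt.2.2.2 < it.2.2.1) → it.2.1 + jt.2.1 ≤ b)
    (hcross : ∀ r1 ∈ PySem.List.pyRange 0 N 1, ∀ r2 ∈ PySem.List.pyRange 0 N 1, r1 ≠ r2 →
      ∀ it : Int × Int × Int × Int, it ∈ PySem.List.enumerate (PySem.List.pyGetD bo r1 []) →
      ∀ t2 ∈ PySem.List.pyGetD bo r2 [], it.2.1 + t2.1 ≤ b) :
    pvA2 N bo ≤ b := by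
  refine pvFoldl_le (pvAOut N bo) b _ (fun acc r1 hr1 hacc => ?_) 0 h0
  unfold pvAOut
  refine pvFoldl_le _ b _ (fun a it hit ha => ?_) acc hacc
  refine pvFoldl_le _ b _ (fun a' r2 hr2 ha' => ?_) _ ?_
  · unfold pvACross
    split
    · next hne =>
        refine pvFoldl_le _ b _ (fun a'' t2 ht2 ha'' => ?_) a' ha'
        exact max_le ha'' (hcross r1 hr1 r2 hr2 hne it hit t2 ht2)
    · exact ha'
  · refine pvFoldl_le _ b _ (fun a' jt hjt ha' => ?_) a ha
    unfold pvASame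
    split
    · next hg => exact max_le ha' (hsame r1 hr1 it jt hit hjt hg)
    · exact ha'

-- B-side lower bounds
lemma pvB_lb_same (W : Int) (hW : 0 < W) (rows : List (List Int)) (vals : List Int)
    (hv : vals ∈ rows) (i j : Nat) (hij : i + W.toNat ≤ j) (hj : j < vals.length) :
    vals[i]'(by omega) + vals[j]'hj ≤ pvB2 W rows := by
  unfold pvB2
  refine pvFoldl_ge_via (pvBPair W) (pvBPair_mono W) hv _ (fun acc => ?_) _
  unfold pvBPair
  rw [PySem.List.slice_from vals (by omega)]
  have hlen : (vals.zip (vals.drop W.toNat)).length = vals.length - W.toNat := by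
    simp
  have ht : j - W.toNat < (vals.zip (vals.drop W.toNat)).length := by omega
  have htv : j - W.toNat < vals.length := by omega
  have hdl : j - W.toNat < (vals.drop W.toNat).length := by
    simp only [List.length_drop]; omega
  have hp : (vals.zip (vals.drop W.toNat))[j - W.toNat]'ht = (vals[j - W.toNat]'htv, vals[j]'hj) := by
    rw [List.getElem_zip]
    congr 1
    rw [List.getElem_drop]
    congr 1
    omega
  rcases Nat.lt_or_ge i (j - W.toNat) with hlt | hge
  · have hsub := pvSublist_pair_of_getElem (vals.zip (vals.drop W.toNat)) i (j - W.toNat) hlt ht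
    have hpi : (vals.zip (vals.drop W.toNat))[i]'(by omega)
        = (vals[i]'(by omega), (vals.drop W.toNat)[i]'(by omega)) := List.getElem_zip ..
    have hres := pvPair_lb_pair (vals.zip (vals.drop W.toNat)) (acc, none) _ _ hsub
    rw [hpi, hp] at hres
    exact hres
  · have hieq : i = j - W.toNat := by omega
    subst hieq
    have hres := pvPair_lb_same (vals.zip (vals.drop W.toNat)) (acc, none) _ (List.getElem_mem ht)
    rw [hp] at hres
    exact hres

lemma pvB_lb_cross (W : Int) (rows : List (List Int)) (vals1 vals2 : List Int)
    (hsub : [vals1, vals2].Sublist rows) (v1 v2 : Int) (h1 : v1 ∈ vals1) (h2 : v2 ∈ vals2) :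
    v1 + v2 ≤ pvB2 W rows := by
  have hn1 : vals1 ≠ [] := List.ne_nil_of_mem h1
  have hn2 : vals2 ≠ [] := List.ne_nil_of_mem h2
  obtain ⟨m1, hm1⟩ : ∃ m, PySem.List.max? vals1 (fun y => y) = some m := by
    cases hc : PySem.List.max? vals1 (fun y => y) with
    | none => exact absurd ((PySem.List.max?_eq_none_iff _ _).mp hc) hn1
    | some m => exact ⟨m, rfl⟩
  obtain ⟨m2, hm2⟩ : ∃ m, PySem.List.max? vals2 (fun y => y) = some m := by
    cases hc : PySem.List.max? vals2 (fun y => y) with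
    | none => exact absurd ((PySem.List.max?_eq_none_iff _ _).mp hc) hn2
    | some m => exact ⟨m, rfl⟩
  have hfs : [vals1, vals2].Sublist (rows.filter (fun v => !v.isEmpty)) := by
    have hflt := hsub.filter (fun v => !v.isEmpty)
    simpa [List.filter_cons, List.isEmpty_iff, hn1, hn2] using hflt
  have hms : [(PySem.List.max? vals1 (fun y => y)).getD 0,
      (PySem.List.max? vals2 (fun y => y)).getD 0].Sublist (pvRowMax rows) := by
    unfold pvRowMax
    exact List.Sublist.map (fun vals => (PySem.List.max? vals (fun y => y)).getD 0) hfs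
  have hcr := pvCross_lb_pair (pvRowMax rows) ((0 : Int), (none : Option Int)) _ _ hms
  have hv1 : v1 ≤ m1 := PySem.List.max?_isMax hm1 v1 h1
  have hv2 : v2 ≤ m2 := PySem.List.max?_isMax hm2 v2 h2
  rw [hm1, hm2] at hcr
  simp only [Option.getD_some] at hcr
  have hfin := le_trans hcr (pvB2_ge_cross W rows)
  omega

-- B-side upper bound
lemma pvB_ub (W : Int) (hW : 0 < W) (rows : List (List Int)) (b : Int) (h0 : 0 ≤ b)
    (hsame : ∀ vals ∈ rows, ∀ (i j : Nat) (hij : i + W.toNat ≤ j) (hj : j < vals.length),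
      vals[i]'(by omega) + vals[j]'hj ≤ b)
    (hcross : ∀ vals1 vals2 : List Int, [vals1, vals2].Sublist rows →
      ∀ v1 ∈ vals1, ∀ v2 ∈ vals2, v1 + v2 ≤ b) :
    pvB2 W rows ≤ b := by
  unfold pvB2
  refine pvFoldl_le (pvBPair W) b _ (fun acc vals hvals hacc => ?_) _ ?_
  · unfold pvBPair
    rw [PySem.List.slice_from vals (by omega)]
    refine pvPair_ub _ (acc, none) b hacc (fun v hv q hq => by simp at hv) ?_ ?_
    · intro q hq
      obtain ⟨t, ht, hqe⟩ := List.mem_iff_getElem.mp hq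
      have hlen : (vals.zip (vals.drop W.toNat)).length = vals.length - W.toNat := by simp
      have htv : t < vals.length := by omega
      have hj : W.toNat + t < vals.length := by omega
      have hp : (vals.zip (vals.drop W.toNat))[t]'ht = (vals[t]'htv, vals[W.toNat + t]'hj) := by
        rw [List.getElem_zip]
        congr 1
        rw [List.getElem_drop]
      rw [hp] at hqe
      subst hqe
      exact hsame vals hvals t (W.toNat + t) (by omega) hj
    · intro q q' hqq
      obtain ⟨t1, t2, ht1, ht2, hlt, hq1, hq2⟩ := pvSublist_pair_to_getElem _ q q' hqq
      have hlen : (vals.zip (vals.drop W.toNat)).length = vals.length - W.toNat := by simp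
      have ht1v : t1 < vals.length := by omega
      have ht2v : t2 < vals.length := by omega
      have hj2 : W.toNat + t2 < vals.length := by omega
      have hd1 : t1 < (vals.drop W.toNat).length := by
        simp only [List.length_drop]; omega
      have hp1 : (vals.zip (vals.drop W.toNat))[t1]'ht1 = (vals[t1]'ht1v, (vals.drop W.toNat)[t1]'hd1) :=
        List.getElem_zip ..
      have hp2 : (vals.zip (vals.drop W.toNat))[t2]'ht2 = (vals[t2]'ht2v, vals[W.toNat + t2]'hj2) := by
        rw [List.getElem_zip]
        congr 1
        rw [List.getElem_drop]
      rw [hp1] at hq1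
      rw [hp2] at hq2
      subst hq1
      subst hq2
      show vals[t1]'ht1v + vals[W.toNat + t2]'hj2 ≤ b
      exact hsame vals hvals t1 (W.toNat + t2) (by omega) hj2
  · refine pvCross_ub _ ((0 : Int), (none : Option Int)) b h0 (fun v hv _ _ => by simp at hv) ?_
    intro x y hxy
    unfold pvRowMax at hxy
    rw [List.sublist_map_iff] at hxy
    obtain ⟨l', hl', heq⟩ := hxy
    rcases l' with _ | ⟨w1, _ | ⟨w2, _ | ⟨w3, t⟩⟩⟩ <;> simp at heq
    obtain ⟨hx, hy⟩ := heq
    have hw1 : w1 ∈ rows.filter (fun v => !v.isEmpty) := hl'.subset (by simp)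
    have hw2 : w2 ∈ rows.filter (fun v => !v.isEmpty) := hl'.subset (by simp)
    have hn1 : w1 ≠ [] := by
      have := List.of_mem_filter hw1; simpa [List.isEmpty_iff] using this
    have hn2 : w2 ≠ [] := by
      have := List.of_mem_filter hw2; simpa [List.isEmpty_iff] using this
    obtain ⟨m1, hm1⟩ : ∃ m, PySem.List.max? w1 (fun y => y) = some m := by
      cases hc : PySem.List.max? w1 (fun y => y) with
      | none => exact absurd ((PySem.List.max?_eq_none_iff _ _).mp hc) hn1
      | some m => exact ⟨m, rfl⟩
    obtain ⟨m2, hm2⟩ : ∃ m, PySem.List.max? w2 (fun y => y) = some m := by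
      cases hc : PySem.List.max? w2 (fun y => y) with
      | none => exact absurd ((PySem.List.max?_eq_none_iff _ _).mp hc) hn2
      | some m => exact ⟨m, rfl⟩
    have hsubr : [w1, w2].Sublist rows := hl'.trans List.filter_sublist
    have hxm : x = m1 := by rw [hx, hm1]; rfl
    have hym : y = m2 := by rw [hy, hm2]; rfl
    rw [hxm, hym]
    exact hcross w1 w2 hsubr m1 (PySem.List.max?_mem hm1) m2 (PySem.List.max?_mem hm2)

-- the main combination equivalence
lemma pvOptRow_length (N M C : Int) (weights : List (List Int)) (r : Int) :
    (pvOptRow N M C weights r).length = (N - M + 1).toNat := by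
  unfold pvOptRow
  simp [PySem.List.length_pyRange_one]

lemma pvValRow_length (N M C : Int) (weights : List (List Int)) (r : Int) :
    (pvValRow N M C weights r).length = (N - M + 1).toNat := by
  unfold pvValRow
  simp [PySem.List.length_pyRange_one]

lemma pvOptRow_getElem (N M C : Int) (weights : List (List Int)) (r : Int) (k : Nat)
    (hk : k < (pvOptRow N M C weights r).length) :
    (pvOptRow N M C weights r)[k]'hk = (pvF M C weights r (k : Int), (k : Int), (k : Int) + M - 1) := by
  unfold pvOptRow
  simp [PySem.List.getElem_pyRange_one]

lemma pvValRow_getElem (N M C : Int) (weights : List (List Int)) (r : Int) (k : Nat)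
    (hk : k < (pvValRow N M C weights r).length) :
    (pvValRow N M C weights r)[k]'hk = pvF M C weights r (k : Int) := by
  unfold pvValRow
  simp [PySem.List.getElem_pyRange_one]

lemma pvMain (N M C : Int) (weights : List (List Int)) :
    pvA2 N ((PySem.List.pyRange 0 N 1).map (pvOptRow N M C weights))
      = pvB2 (if M > 1 then M else 1) ((PySem.List.pyRange 0 N 1).map (pvValRow N M C weights)) := by
  set W : Int := if M > 1 then M else 1 with hWdef
  have hW : (M ≤ 1 ∧ W = 1) ∨ (2 ≤ M ∧ W = M) := by
    rw [hWdef]; split <;> omega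
  have hW0 : 0 < W := by omega
  set bo := (PySem.List.pyRange 0 N 1).map (pvOptRow N M C weights) with hbo
  set rows := (PySem.List.pyRange 0 N 1).map (pvValRow N M C weights) with hrows
  have hboget : ∀ r : Int, 0 ≤ r → r < N → PySem.List.pyGetD bo r [] = pvOptRow N M C weights r := by
    intro r h0 h1
    rw [hbo]
    exact PySem.List.pyGetD_map_pyRange_of_nonneg _ _ _ _ h0 h1
  refine le_antisymm ?_ ?_
  · -- A ≤ B
    refine pvA_ub N bo _ (pvB2_nonneg W rows) ?_ ?_
    · -- same-row contributions of A land in B's prefix-max pass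
      intro r1 hr1 it jt hit hjt hg
      obtain ⟨hr1a, hr1b⟩ := (PySem.List.mem_pyRange_one).mp hr1
      rw [hboget r1 hr1a hr1b, PySem.List.mem_enumerate_iff] at hit hjt
      obtain ⟨k1, hk1, rfl⟩ := hit
      obtain ⟨k2, hk2, rfl⟩ := hjt
      rw [pvOptRow_getElem] at hg ⊢
      rw [pvOptRow_getElem] at hg ⊢
      simp only [zero_add] at hg ⊢
      have hkl1 : k1 < (N - M + 1).toNat := by rw [← pvOptRow_length N M C weights r1]; exact hk1
      have hkl2 : k2 < (N - M + 1).toNat := by rw [← pvOptRow_length N M C weights r1]; exact hk2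
      have hvmem : pvValRow N M C weights r1 ∈ rows := by
        rw [hrows]; exact List.mem_map_of_mem hr1
      have hvl1 : k1 < (pvValRow N M C weights r1).length := by
        rw [pvValRow_length]; exact hkl1
      have hvl2 : k2 < (pvValRow N M C weights r1).length := by
        rw [pvValRow_length]; exact hkl2
      rcases hg with ⟨hne, hor⟩
      have hcases : k1 + W.toNat ≤ k2 ∨ k2 + W.toNat ≤ k1 := by omega
      rcases hcases with hc | hc
      · have hres := pvB_lb_same W hW0 rows (pvValRow N M C weights r1) hvmem k1 k2 hc hvl2
        rw [pvValRow_getElem, pvValRow_getElem] at hres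
        exact hres
      · have hres := pvB_lb_same W hW0 rows (pvValRow N M C weights r1) hvmem k2 k1 hc hvl1
        rw [pvValRow_getElem, pvValRow_getElem] at hres
        omega
    · -- cross-row contributions of A land in B's row-maxima pass
      intro r1 hr1 r2 hr2 hne it hit t2 ht2
      obtain ⟨hr1a, hr1b⟩ := (PySem.List.mem_pyRange_one).mp hr1
      obtain ⟨hr2a, hr2b⟩ := (PySem.List.mem_pyRange_one).mp hr2
      rw [hboget r1 hr1a hr1b, PySem.List.mem_enumerate_iff] at hit
      obtain ⟨k1, hk1, rfl⟩ := hit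
      rw [pvOptRow_getElem]
      rw [hboget r2 hr2a hr2b] at ht2
      unfold pvOptRow at ht2
      rw [List.mem_map] at ht2
      obtain ⟨c2, hc2, rfl⟩ := ht2
      simp only
      have hkl1 : k1 < (N - M + 1).toNat := by rw [← pvOptRow_length N M C weights r1]; exact hk1
      have hm1 : pvF M C weights r1 (k1 : Int) ∈ pvValRow N M C weights r1 := by
        unfold pvValRow
        refine List.mem_map_of_mem ?_
        rw [PySem.List.mem_pyRange_one]
        omega
      have hm2 : pvF M C weights r2 c2 ∈ pvValRow N M C weights r2 :=
        List.mem_map_of_mem hc2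
      rcases lt_or_gt_of_ne hne with hlt | hlt
      · have hsub : [pvValRow N M C weights r1, pvValRow N M C weights r2].Sublist rows := by
          rw [hrows]
          exact (pvSublist_pair_of_mem_sorted _ (PySem.List.pairwise_lt_pyRange_one 0 N) r1 r2 hr1 hr2 hlt).map _
        exact pvB_lb_cross W rows _ _ hsub _ _ hm1 hm2
      · have hsub : [pvValRow N M C weights r2, pvValRow N M C weights r1].Sublist rows := by
          rw [hrows]
          exact (pvSublist_pair_of_mem_sorted _ (PySem.List.pairwise_lt_pyRange_one 0 N) r2 r1 hr2 hr1 hlt).map _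
        have hres := pvB_lb_cross W rows _ _ hsub _ _ hm2 hm1
        omega
  · -- B ≤ A
    refine pvB_ub W hW0 rows _ (pvA2_nonneg N bo) ?_ ?_
    · -- B's prefix-max contributions are admissible same-row pairs of A
      intro vals hvals i j hij hj
      rw [hrows, List.mem_map] at hvals
      obtain ⟨r, hr, rfl⟩ := hvals
      obtain ⟨hra, hrb⟩ := (PySem.List.mem_pyRange_one).mp hr
      have hi : i < (pvValRow N M C weights r).length := by omega
      have hko : (pvOptRow N M C weights r).length = (pvValRow N M C weights r).length := by
        rw [pvOptRow_length, pvValRow_length]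
      have hio : i < (pvOptRow N M C weights r).length := by omega
      have hjo : j < (pvOptRow N M C weights r).length := by omega
      have hiti : ((i : Int), (pvOptRow N M C weights r)[i]'hio)
          ∈ PySem.List.enumerate (PySem.List.pyGetD bo r []) := by
        rw [hboget r hra hrb, PySem.List.mem_enumerate_iff]
        exact ⟨i, hio, by simp⟩
      have hitj : ((j : Int), (pvOptRow N M C weights r)[j]'hjo)
          ∈ PySem.List.enumerate (PySem.List.pyGetD bo r []) := by
        rw [hboget r hra hrb, PySem.List.mem_enumerate_iff]
        exact ⟨j, hjo, by simp⟩
      have hres := pvA_lb_same N bo r hr _ _ hiti hitj ?_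
      · rw [pvOptRow_getElem, pvOptRow_getElem] at hres
        simp only at hres
        rw [pvValRow_getElem, pvValRow_getElem]
        exact hres
      · rw [pvOptRow_getElem, pvOptRow_getElem]
        simp only
        constructor
        · intro hcon
          have : i = j := by exact_mod_cast hcon
          omega
        · left
          have : (i : Int) + W ≤ (j : Int) := by omega
          omega
    · -- B's cross contributions are admissible cross-row pairs of A
      intro vals1 vals2 hsub v1 hv1 v2 hv2
      rw [hrows] at hsub
      rw [List.sublist_map_iff] at hsub
      obtain ⟨l', hl', heq⟩ := hsub
      rcases l' with _ | ⟨r1, _ | ⟨r2, _ | ⟨r3, t⟩⟩⟩ <;> simp at heq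
      obtain ⟨he1, he2⟩ := heq
      have hr1 : r1 ∈ PySem.List.pyRange 0 N 1 := hl'.subset (by simp)
      have hr2 : r2 ∈ PySem.List.pyRange 0 N 1 := hl'.subset (by simp)
      have hlt : r1 < r2 := by
        have hp := (PySem.List.pairwise_lt_pyRange_one 0 N).sublist hl'
        simpa using hp
      obtain ⟨hr1a, hr1b⟩ := (PySem.List.mem_pyRange_one).mp hr1
      obtain ⟨hr2a, hr2b⟩ := (PySem.List.mem_pyRange_one).mp hr2
      subst he1
      subst he2
      unfold pvValRow at hv1 hv2
      rw [List.mem_map] at hv1 hv2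
      obtain ⟨c1, hc1, rfl⟩ := hv1
      obtain ⟨c2, hc2, rfl⟩ := hv2
      obtain ⟨hc1a, hc1b⟩ := (PySem.List.mem_pyRange_one).mp hc1
      have hk1 : c1.toNat < (pvOptRow N M C weights r1).length := by
        rw [pvOptRow_length]; omega
      have hiti : ((c1.toNat : Int), (pvOptRow N M C weights r1)[c1.toNat]'hk1)
          ∈ PySem.List.enumerate (PySem.List.pyGetD bo r1 []) := by
        rw [hboget r1 hr1a hr1b, PySem.List.mem_enumerate_iff]
        exact ⟨c1.toNat, hk1, by simp⟩
      have ht2 : (pvF M C weights r2 c2, c2, c2 + M - 1) ∈ PySem.List.pyGetD bo r2 [] := by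
        rw [hboget r2 hr2a hr2b]
        unfold pvOptRow
        exact List.mem_map_of_mem hc2
      have hres := pvA_lb_cross N bo r1 r2 hr1 hr2 (ne_of_lt hlt) _ hiti _ ht2
      rw [pvOptRow_getElem] at hres
      simp only at hres
      have hcast : (c1.toNat : Int) = c1 := by omega
      rw [hcast] at hres
      exact hres

-- ===== VERDICT (by name: the statement is the Claim_ definition above) =====
theorem max_value_stolen_spec : Claim_equal_max_value_stolen := by
  intro N M C weights _ _
  unfold Spec_max_value_stolen
  rw [pvA_eq, pvB_eq, pvMain]
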